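-- pv_equiv track=rewrite | github.com/Numaphor/stranded | tools/generate_wall_painting_sprites.py | _flatten_palette_256
-- ===== SOURCE A (Python) =====
-- def _flatten_palette_256(colors: list[tuple[int, int, int]]) -> list[int]:
--     palette = list(colors)
--
--     if len(palette) > 256:
--         raise ValueError(f"Expected <= 256 palette entries, got {len(palette)}")
--
--     # BMP/Pillow palette is 256 entries (768 bytes).
--     while len(palette) < 256:
--         palette.append((0, 0, 0))
--
--     flat: list[int] = []
--     for r, g, b in palette:
--         flat.extend((r, g, b))
--
--     return flat
-- ===== SOURCE B (Python) =====
-- def _flatten_palette_256(colors: list[tuple[int, int, int]]) -> list[int]: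
--     if len(colors) > 256:
--         raise ValueError(f"Expected <= 256 palette entries, got {len(colors)}")
--     n = len(colors)
--     return [colors[i // 3][i % 3] if i // 3 < n else 0 for i in range(768)]
-- ===== Notes on version B (the rewrite author's own statement) =====
-- stated objective: alternative
-- what changed: B builds the 768-element result directly by index arithmetic (element i is component i%3 of color i//3, or 0 past the real colors), with no padding list, no append loop and no flattening pass as in A.
import Mathlib
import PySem

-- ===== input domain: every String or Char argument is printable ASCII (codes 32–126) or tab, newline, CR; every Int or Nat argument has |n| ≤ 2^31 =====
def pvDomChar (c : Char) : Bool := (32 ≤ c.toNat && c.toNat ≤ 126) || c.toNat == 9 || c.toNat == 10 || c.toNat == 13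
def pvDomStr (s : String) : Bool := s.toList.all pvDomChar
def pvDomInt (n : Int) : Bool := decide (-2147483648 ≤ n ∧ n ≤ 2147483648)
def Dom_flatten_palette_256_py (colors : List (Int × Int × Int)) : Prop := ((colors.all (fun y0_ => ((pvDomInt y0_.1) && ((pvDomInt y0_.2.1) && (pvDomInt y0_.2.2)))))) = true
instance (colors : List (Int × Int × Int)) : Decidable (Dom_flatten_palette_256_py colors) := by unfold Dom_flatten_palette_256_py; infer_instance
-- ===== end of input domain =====

-- B builds the 768-slot result directly by index arithmetic (slot i = component i%3 of color i//3,
-- or 0 past the real colors), instead of A's append-padding loop followed by a flattening loop.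


-- ===== PORT A =====
-- while len(palette) < 256: palette.append((0, 0, 0))
def padA (palette : List (Int × Int × Int)) : List (Int × Int × Int) :=
  if palette.length < 256 then padA (palette ++ [(0, 0, 0)]) else palette
termination_by 256 - palette.length
decreasing_by simp; omega

def flatten_palette_256_py (colors : List (Int × Int × Int)) : List Int :=
  -- the `len(palette) > 256` guard raises ValueError; excluded by Pre_
  let palette := padA colors
  palette.foldl (fun flat rgb => flat ++ [rgb.1, rgb.2.1, rgb.2.2]) []

-- ===== PORT B =====
-- tuple indexing rgb[i % 3] ported as the explicit 0/1/2 chain (exact: i % 3 ∈ {0,1,2})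
def flatten_palette_256_py_alt (colors : List (Int × Int × Int)) : List Int :=
  let n := colors.length
  (List.range 768).map (fun i =>
    if i / 3 < n then
      let rgb := colors.getD (i / 3) (0, 0, 0)
      if i % 3 == 0 then rgb.1 else if i % 3 == 1 then rgb.2.1 else rgb.2.2
    else 0)

-- ===== PRECONDITION & SPEC =====
-- Pre_ excludes exactly the inputs (more than 256 entries) on which A raises ValueError.
def Pre_flatten_palette_256_py (colors : List (Int × Int × Int)) : Prop := colors.length ≤ 256
instance (colors : List (Int × Int × Int)) : Decidable (Pre_flatten_palette_256_py colors) := by unfold Pre_flatten_palette_256_py; infer_instance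
def pvWitness_flatten_palette_256_py : (List (Int × Int × Int)) := [(1, 2, 3), (0, 255, 7)]

def Spec_flatten_palette_256_py (colors : List (Int × Int × Int)) (out : List Int) : Prop := out = flatten_palette_256_py_alt colors
instance (colors : List (Int × Int × Int)) (out : List Int) : Decidable (Spec_flatten_palette_256_py colors out) := by unfold Spec_flatten_palette_256_py; infer_instance

-- ===== CLAIM (what is proved, stated in full; the proofs are below) =====
def Claim_equal_flatten_palette_256_py : Prop := ∀ (colors : List (Int × Int × Int)), Dom_flatten_palette_256_py colors → Pre_flatten_palette_256_py colors → Spec_flatten_palette_256_py colors (flatten_palette_256_py colors)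

-- ===== LEMMAS AND PROOFS =====
theorem padA_eq (palette : List (Int × Int × Int)) :
    padA palette = palette ++ List.replicate (256 - palette.length) (0, 0, 0) := by
  by_cases h : palette.length < 256
  · rw [padA, if_pos h, padA_eq (palette ++ [(0, 0, 0)])]
    have : 256 - palette.length = (256 - (palette.length + 1)) + 1 := by omega
    simp [this, List.replicate_succ]
  · rw [padA, if_neg h]
    have : 256 - palette.length = 0 := by omega
    simp [this]
termination_by 256 - palette.length
decreasing_by simp; omega

theorem foldl_flat (l : List (Int × Int × Int)) (acc : List Int) :
    l.foldl (fun flat rgb => flat ++ [rgb.1, rgb.2.1, rgb.2.2]) acc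
      = acc ++ l.flatMap (fun rgb => [rgb.1, rgb.2.1, rgb.2.2]) := by
  induction l generalizing acc with
  | nil => simp
  | cons x xs ih => simp [List.foldl_cons, ih, List.flatMap_cons]

theorem flatMap_replicate_zero (n : Nat) :
    (List.replicate n ((0 : Int), (0 : Int), (0 : Int))).flatMap
        (fun rgb => [rgb.1, rgb.2.1, rgb.2.2])
      = List.replicate (3 * n) (0 : Int) := by
  induction n with
  | zero => simp
  | succ k ih =>
      have h3 : 3 * (k + 1) = 3 * k + 3 := by omega
      simp [List.replicate_succ, List.flatMap_cons, ih, h3]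

theorem flat_length (l : List (Int × Int × Int)) :
    (l.flatMap (fun rgb => [rgb.1, rgb.2.1, rgb.2.2])).length = 3 * l.length := by
  induction l with
  | nil => simp
  | cons x xs ih => simp [List.flatMap_cons, ih]; omega

theorem flat_getElem (l : List (Int × Int × Int)) (i : Nat) (h : i < 3 * l.length)
    (h2 : i < (l.flatMap (fun rgb => [rgb.1, rgb.2.1, rgb.2.2])).length)
    (h3 : i / 3 < l.length) :
    (l.flatMap (fun rgb => [rgb.1, rgb.2.1, rgb.2.2]))[i]
      = (if i % 3 == 0 then l[i / 3].1
         else if i % 3 == 1 then l[i / 3].2.1 else l[i / 3].2.2) := by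
  induction l generalizing i with
  | nil => simp at h
  | cons x xs ih =>
    match i, h with
    | 0, _ => simp
    | 1, _ => simp
    | 2, _ => simp
    | (k + 3), h =>
      have hk : k < 3 * xs.length := by simp at h; omega
      have hk2 : k < (xs.flatMap (fun rgb => [rgb.1, rgb.2.1, rgb.2.2])).length := by
        rw [flat_length]; omega
      have hk3 : k / 3 < xs.length := by omega
      have e1 : (k + 3) / 3 = k / 3 + 1 := by omega
      have e2 : (k + 3) % 3 = k % 3 := by omega
      have := ih k hk hk2 hk3
      simp only [List.flatMap_cons]
      rw [List.getElem_append_right (by simp)]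
      simpa [e1, e2] using this

-- ===== VERDICT (by name: the statement is the Claim_ definition above) =====
theorem flatten_palette_256_py_spec : Claim_equal_flatten_palette_256_py := by
  intro colors _ hpre
  unfold Spec_flatten_palette_256_py flatten_palette_256_py flatten_palette_256_py_alt
  simp only [padA_eq, foldl_flat, List.nil_append, List.flatMap_append]
  have hlen : colors.length ≤ 256 := hpre
  apply List.ext_getElem
  · simp [flatMap_replicate_zero]
    omega
  · intro i h1 h2
    have hi : i < 768 := by simpa using h2
    rw [List.getElem_map, List.getElem_range]
    by_cases hc : i / 3 < colors.length
    · have hlt : i < 3 * colors.length := by omega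
      have hflen : i < (colors.flatMap (fun rgb => [rgb.1, rgb.2.1, rgb.2.2])).length := by
        rw [flat_length]; omega
      rw [List.getElem_append_left hflen, flat_getElem colors i hlt hflen hc, if_pos hc]
      have : colors.getD (i / 3) (0, 0, 0) = colors[i / 3] := List.getD_eq_getElem _ _ hc
      rw [this]
    · have hge : (colors.flatMap (fun rgb => [rgb.1, rgb.2.1, rgb.2.2])).length ≤ i := by
        rw [flat_length]; omega
      rw [List.getElem_append_right hge, if_neg hc]
      simp [flatMap_replicate_zero, List.getElem_replicate]
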